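-- pv_equiv track=rewrite | github.com/SamuelGuillemet/SEAK | components/pre-processing/pre_processing/data_agregation/find_date.py | find_first_date_occurence
-- ===== SOURCE A (Python) =====
-- def extract_date(line: str) -> str:
--     """
--     Extract the date from a line in a csv file
--
--     Args:
--         line (str): A line in the file
--
--     Returns:
--         str: The date in the line as "YYYY-MM-DD"
--     """
--     return line.split(",")[0].split(" ")[0]
--
-- def find_first_date_occurence(lines: list[str], target_date: str) -> int:
--     """
--     Find the first occurence of a date in a list of lines
--
--     Args:
--         lines (list[str]): A list of lines in the file
--         target_date (str): The date to find
--
--     Returns: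
--         int: The index of the first occurence of the date in the list of lines
--     """
--     # Perform binary search to find the position
--     left, right = 0, len(lines) - 1
--     while left <= right:
--         mid = left + (right - left) // 2
--         date_str = extract_date(lines[mid])
--         if date_str == target_date:
--             return mid
--
--         if date_str < target_date:
--             left = mid + 1
--         else:
--             right = mid - 1
--
--     return -1
-- ===== SOURCE B (Python) =====
-- def find_first_date_occurence(lines: list[str], target_date: str) -> int:
--     """Recursive divide-and-conquer binary search; the date key is taken as the
--     prefix of the line up to the first ',' or ' ' (a single scan instead of two splits)."""
--
--     def date_key(line: str) -> str:
--         out = []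
--         for c in line:
--             if c == ',' or c == ' ':
--                 break
--             out.append(c)
--         return ''.join(out)
--
--     def search(lo: int, hi: int) -> int:
--         if lo > hi:
--             return -1
--         mid = lo + (hi - lo) // 2
--         d = date_key(lines[mid])
--         if d < target_date:
--             return search(mid + 1, hi)
--         if d > target_date:
--             return search(lo, mid - 1)
--         return mid
--
--     return search(0, len(lines) - 1)
-- ===== Notes on version B (the rewrite author's own statement) =====
-- stated objective: alternative
-- what changed: Iterative while-loop binary search with an equality-first branch chain becomes a recursive divide-and-conquer helper with a comparison-ordered chain, and the two-split date extraction becomes a single take-until-separator scan of the line.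
import Mathlib
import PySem

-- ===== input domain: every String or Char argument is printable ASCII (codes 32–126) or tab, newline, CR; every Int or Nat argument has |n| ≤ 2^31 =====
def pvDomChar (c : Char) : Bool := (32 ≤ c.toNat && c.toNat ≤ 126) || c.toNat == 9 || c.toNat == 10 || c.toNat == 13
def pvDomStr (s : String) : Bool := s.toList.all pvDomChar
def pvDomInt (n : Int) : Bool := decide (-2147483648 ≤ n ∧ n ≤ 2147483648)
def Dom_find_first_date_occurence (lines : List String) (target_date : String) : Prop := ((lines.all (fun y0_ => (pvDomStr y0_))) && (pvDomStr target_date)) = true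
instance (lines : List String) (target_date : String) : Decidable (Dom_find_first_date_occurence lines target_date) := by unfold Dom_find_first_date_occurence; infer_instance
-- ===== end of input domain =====

-- ===== PORT A =====
-- Binary search for the first probed line whose extracted date equals target_date.
-- B rewrites the iterative loop as recursive divide-and-conquer with a single-scan
-- date key; same return value is proved (alternative decomposition, no speed claim).

-- A: extract_date(line) = line.split(",")[0].split(" ")[0]
def pvExtractDate (line : String) : String :=
  let parts1 := (PySem.Str.split? line ",").getD []
  let first1 := parts1.headD ""        -- [0]: split with a nonempty separator is never empty
  let parts2 := (PySem.Str.split? first1 " ").getD []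
  parts2.headD ""

-- A: the while-loop, state (left, right); the Nat argument is fuel only (the callers pass
-- enough for the loop to run to completion, see pv_fuel_A below), recursion is structural
def pvLoopA (lines : List String) (target_date : String) : Nat → Int → Int → Int
  | 0, _, _ => -1
  | fuel + 1, left, right =>
    if left ≤ right then
      let mid := left + PySem.Int.floordiv (right - left) 2
      let date_str := pvExtractDate (PySem.List.pyGetD lines mid "")
      if date_str = target_date then mid
      else if date_str < target_date then pvLoopA lines target_date fuel (mid + 1) right
      else pvLoopA lines target_date fuel left (mid - 1)
    else -1

def find_first_date_occurence (lines : List String) (target_date : String) : Int :=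
  pvLoopA lines target_date (lines.length + 1) 0 (lines.length - 1)

-- ===== PORT B =====
-- B: date_key(line): collect characters until the first ',' or ' '
def pvKeyChars : List Char → List Char
  | [] => []
  | c :: cs => if c = ',' || c = ' ' then [] else c :: pvKeyChars cs

def pvDateKey (line : String) : String :=
  String.ofList (pvKeyChars line.toList)

-- B: search(lo, hi), recursive divide-and-conquer (same fuel convention as above)
def pvSearchB (lines : List String) (target_date : String) : Nat → Int → Int → Int
  | 0, _, _ => -1
  | fuel + 1, lo, hi =>
    if lo > hi then -1
    else
      let mid := lo + PySem.Int.floordiv (hi - lo) 2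
      let d := pvDateKey (PySem.List.pyGetD lines mid "")
      if d < target_date then pvSearchB lines target_date fuel (mid + 1) hi
      else if target_date < d then pvSearchB lines target_date fuel lo (mid - 1)
      else mid

def find_first_date_occurence_alt (lines : List String) (target_date : String) : Int :=
  pvSearchB lines target_date (lines.length + 1) 0 (lines.length - 1)

-- ===== PRECONDITION & SPEC =====
def Spec_find_first_date_occurence (lines : List String) (target_date : String) (out : Int) : Prop := out = find_first_date_occurence_alt lines target_date
instance (lines : List String) (target_date : String) (out : Int) : Decidable (Spec_find_first_date_occurence lines target_date out) := by unfold Spec_find_first_date_occurence; infer_instance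

-- ===== CLAIM (what is proved, stated in full; the proofs are below) =====
def Claim_equal_find_first_date_occurence : Prop := ∀ (lines : List String) (target_date : String), Dom_find_first_date_occurence lines target_date → Spec_find_first_date_occurence lines target_date (find_first_date_occurence lines target_date)

-- ===== LEMMAS AND PROOFS =====

-- head of splitOn.go when the accumulator is nonempty: the oldest accumulated piece
theorem pv_go_head_acc (sep : List Char) : ∀ (fuel : Nat) (l cur : List Char)
    (acc : List (List Char)) (a : List Char),
    (PySem.Chars.splitOn.go sep fuel l (cur) (acc ++ [a])).head? = some a := by
  intro fuel
  induction fuel with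
  | zero => intro l cur acc a; simp [PySem.Chars.splitOn.go]
  | succ f ih =>
    intro l cur acc a
    cases l with
    | nil => simp [PySem.Chars.splitOn.go]
    | cons c rest =>
      simp only [PySem.Chars.splitOn.go]
      split
      · exact ih _ _ (_ :: acc) a
      · exact ih _ _ acc a

-- head of splitOn.go with empty accumulator and a single-character separator
theorem pv_go_head (sc : Char) : ∀ (fuel : Nat) (l cur : List Char), l.length < fuel →
    (PySem.Chars.splitOn.go [sc] fuel l cur []).head? =
      some (cur.reverse ++ l.takeWhile (fun c => c ≠ sc)) := by
  intro fuel
  induction fuel with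
  | zero => intro l cur h; omega
  | succ f ih =>
    intro l cur h
    cases l with
    | nil => simp [PySem.Chars.splitOn.go]
    | cons c rest =>
      simp only [PySem.Chars.splitOn.go]
      by_cases hc : c = sc
      · subst hc
        have hp : List.isPrefixOf [c] (c :: rest) = true := by
          simp [List.isPrefixOf]
        simp only [hp]
        have := pv_go_head_acc [c] f (List.drop 1 (c :: rest)) [] [] cur.reverse
        simpa [List.takeWhile] using this
      · have hp : List.isPrefixOf [sc] (c :: rest) = false := by
          simp [List.isPrefixOf]; exact fun hh => absurd hh.symm hc
        simp only [hp]
        simp only [Bool.false_eq_true, if_false]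
        have := ih rest (c :: cur) (by simpa using Nat.lt_of_succ_lt_succ h)
        rw [this]
        simp [List.takeWhile, hc]

-- splitOn by a single character: first piece is takeWhile (· ≠ sc)
theorem pv_splitOn_head (sc : Char) (l : List Char) :
    (PySem.Chars.splitOn l [sc]).head? = some (l.takeWhile (fun c => c ≠ sc)) := by
  unfold PySem.Chars.splitOn
  simpa using pv_go_head sc (l.length + 1) l [] (by omega)

theorem pv_split_first (s : String) (sc : Char) (sep : String) (hs : sep.toList = [sc]) :
    ((PySem.Str.split? s sep).getD []).headD "" =
      String.ofList (s.toList.takeWhile (fun c => c ≠ sc)) := by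
  have h := pv_splitOn_head sc s.toList
  obtain ⟨p, ps, hh⟩ : ∃ p ps, PySem.Chars.splitOn s.toList [sc] = p :: ps := by
    cases e : PySem.Chars.splitOn s.toList [sc]
    · rw [e] at h; simp at h
    · exact ⟨_, _, rfl⟩
  rw [hh] at h
  simp only [List.head?_cons, Option.some.injEq] at h
  unfold PySem.Str.split? PySem.Chars.split?
  rw [hs]
  simp [hh, h]

-- the two extraction routines agree
theorem pv_keyChars_eq (l : List Char) :
    pvKeyChars l = (l.takeWhile (fun c => c ≠ ',')).takeWhile (fun c => c ≠ ' ') := by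
  induction l with
  | nil => rfl
  | cons c cs ih =>
    by_cases h1 : c = ','
    · subst h1; simp [pvKeyChars, List.takeWhile]
    · by_cases h2 : c = ' '
      · subst h2; simp [pvKeyChars, List.takeWhile]
      · simp [pvKeyChars, List.takeWhile, h1, h2, ih]

theorem pv_key_eq_extract (line : String) : pvDateKey line = pvExtractDate line := by
  simp only [pvDateKey, pvExtractDate]
  rw [pv_split_first line ',' "," (by decide)]
  rw [pv_keyChars_eq]
  rw [pv_split_first (String.ofList (line.toList.takeWhile (fun c => c ≠ ','))) ' ' " " (by decide)]
  congr 1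
  simp

-- midpoint bounds: lo ≤ mid ≤ hi whenever lo ≤ hi
theorem pv_mid_bounds (lo hi : Int) (h : lo ≤ hi) :
    lo ≤ lo + PySem.Int.floordiv (hi - lo) 2 ∧ lo + PySem.Int.floordiv (hi - lo) 2 ≤ hi := by
  rw [PySem.Int.floordiv_eq_ediv_of_pos (by omega)]
  have h1 : 0 ≤ (hi - lo) / 2 := Int.ediv_nonneg (by omega) (by omega)
  have h2 : (hi - lo) / 2 ≤ hi - lo := Int.ediv_le_self _ (by omega)
  omega

-- with the same (sufficient) fuel, loop A and recursive search B agree on every window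
theorem pv_loop_eq_search (lines : List String) (target_date : String) :
    ∀ (n : Nat) (lo hi : Int), (hi + 1 - lo).toNat ≤ n →
      pvLoopA lines target_date n lo hi = pvSearchB lines target_date n lo hi := by
  intro n
  induction n with
  | zero => intro lo hi h; rfl
  | succ m ih =>
    intro lo hi h
    rw [pvLoopA, pvSearchB]
    by_cases hle : lo ≤ hi
    · have hb := pv_mid_bounds lo hi hle
      rw [if_pos hle, if_neg (not_lt.mpr hle)]
      simp only [pv_key_eq_extract]
      rcases lt_trichotomy (pvExtractDate (PySem.List.pyGetD lines
          (lo + PySem.Int.floordiv (hi - lo) 2) "")) target_date with hc | hc | hc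
      · rw [if_neg (ne_of_lt hc), if_pos hc, if_pos hc]
        exact ih (lo + PySem.Int.floordiv (hi - lo) 2 + 1) hi (by omega)
      · rw [if_pos hc, if_neg (by rw [hc]; exact lt_irrefl _),
            if_neg (by rw [hc]; exact lt_irrefl _)]
      · rw [if_neg (ne_of_gt hc), if_neg (not_lt_of_gt hc), if_neg (not_lt_of_gt hc), if_pos hc]
        exact ih lo (lo + PySem.Int.floordiv (hi - lo) 2 - 1) (by omega)
    · rw [if_neg hle, if_pos (by omega)]

-- ===== VERDICT (by name: the statement is the Claim_ definition above) =====
theorem find_first_date_occurence_spec : Claim_equal_find_first_date_occurence := by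
  intro lines target_date _
  unfold Spec_find_first_date_occurence find_first_date_occurence find_first_date_occurence_alt
  exact pv_loop_eq_search lines target_date (lines.length + 1) 0 (lines.length - 1) (by omega)
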